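-- pv_equiv track=rewrite | github.com/ashwaghd/data-mining-cs4400 | Programming2/news-articles/dr_jaccard_and_mrjob.py | reducer_counts
-- ===== SOURCE A (Python) =====
-- def reducer_counts(key, values):
--     # Accumulate counts of intersection and union
--     intersection_count = 0
--     union_count = 0
--     for count_type, count in values:
--         if count_type == 'Intersection':
--             intersection_count += count
--         elif count_type == 'Union':
--             union_count += count
--     # Emit total counts to the final reducer
--     yield 'Jaccard', (intersection_count, union_count)
-- ===== SOURCE B (Python) =====
-- def reducer_counts(key, values):
--     vals = list(values)
--     intersection_count = sum(c for t, c in vals if t == 'Intersection')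
--     union_count = sum(c for t, c in vals if t == 'Union')
--     yield 'Jaccard', (intersection_count, union_count)
-- ===== Notes on version B (the rewrite author's own statement) =====
-- stated objective: simpler
-- what changed: Replaces the single branching accumulator loop with two independent filtered sum() passes over the materialized values.
import Mathlib
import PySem

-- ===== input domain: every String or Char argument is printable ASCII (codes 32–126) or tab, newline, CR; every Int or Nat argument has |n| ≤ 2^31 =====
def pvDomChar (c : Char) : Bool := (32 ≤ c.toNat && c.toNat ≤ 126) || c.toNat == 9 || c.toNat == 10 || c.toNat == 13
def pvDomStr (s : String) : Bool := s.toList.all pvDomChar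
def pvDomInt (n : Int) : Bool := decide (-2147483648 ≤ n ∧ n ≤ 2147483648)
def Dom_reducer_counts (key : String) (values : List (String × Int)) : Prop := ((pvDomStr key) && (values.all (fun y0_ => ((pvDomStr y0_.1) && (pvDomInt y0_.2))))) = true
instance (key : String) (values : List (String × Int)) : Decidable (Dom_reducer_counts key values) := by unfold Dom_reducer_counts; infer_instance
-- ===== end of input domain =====

-- B replaces the single branching accumulator loop with two independent filtered sums (objective: simpler).

-- ===== PORT A =====
def reducer_counts (key : String) (values : List (String × Int)) : List (String × (Int × Int)) :=
  let st := values.foldl (fun (acc : Int × Int) v =>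
    if v.1 == "Intersection" then (acc.1 + v.2, acc.2)
    else if v.1 == "Union" then (acc.1, acc.2 + v.2)
    else acc) (0, 0)
  [("Jaccard", st)]

-- ===== PORT B =====
def reducer_counts_alt (key : String) (values : List (String × Int)) : List (String × (Int × Int)) :=
  let intersection_count := ((values.filter (fun p => p.1 == "Intersection")).map (·.2)).sum
  let union_count := ((values.filter (fun p => p.1 == "Union")).map (·.2)).sum
  [("Jaccard", (intersection_count, union_count))]

-- ===== PRECONDITION & SPEC =====
def Spec_reducer_counts (key : String) (values : List (String × Int)) (out : List (String × (Int × Int))) : Prop := out = reducer_counts_alt key values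
instance (key : String) (values : List (String × Int)) (out : List (String × (Int × Int))) : Decidable (Spec_reducer_counts key values out) := by unfold Spec_reducer_counts; infer_instance

-- ===== CLAIM (what is proved, stated in full; the proofs are below) =====
def Claim_equal_reducer_counts : Prop := ∀ (key : String) (values : List (String × Int)), Dom_reducer_counts key values → Spec_reducer_counts key values (reducer_counts key values)

-- ===== LEMMAS AND PROOFS =====

-- ===== VERDICT (by name: the statement is the Claim_ definition above) =====
lemma fold_counts (values : List (String × Int)) (i u : Int) :
    values.foldl (fun (acc : Int × Int) v =>
      if v.1 == "Intersection" then (acc.1 + v.2, acc.2)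
      else if v.1 == "Union" then (acc.1, acc.2 + v.2)
      else acc) (i, u)
    = (i + ((values.filter (fun p => p.1 == "Intersection")).map (·.2)).sum,
       u + ((values.filter (fun p => p.1 == "Union")).map (·.2)).sum) := by
  induction values generalizing i u with
  | nil => simp
  | cons v vs ih =>
    obtain ⟨t, c⟩ := v
    simp only [List.foldl_cons, List.filter_cons]
    by_cases h1 : (t == "Intersection") = true
    · have huf : (t == "Union") = false := by
        have h := eq_of_beq h1; subst h; decide
      simp only [h1, huf, if_true, Bool.false_eq_true, if_false, List.map_cons, List.sum_cons]
      rw [ih]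
      simp [add_assoc]
    · have h1f : (t == "Intersection") = false := by simpa using h1
      by_cases h2 : (t == "Union") = true
      · simp only [h1f, h2, if_true, Bool.false_eq_true, if_false, List.map_cons, List.sum_cons]
        rw [ih]
        simp [add_assoc]
      · have h2f : (t == "Union") = false := by simpa using h2
        simp only [h1f, h2f, Bool.false_eq_true, if_false]
        exact ih i u

theorem reducer_counts_spec : Claim_equal_reducer_counts := by
  intro key values _
  unfold Spec_reducer_counts reducer_counts reducer_counts_alt
  rw [fold_counts values 0 0]
  simp
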